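-- pv_equiv track=rewrite | github.com/invokerkael918/BinarySearch | 437. Copy Books.py | get_least_ppl
-- ===== SOURCE A (Python) =====
-- def get_least_ppl(pages, limit_time):
--     count = 1
--     time_cost = 0
--     for page in pages:
--         if time_cost + page > limit_time:
--             count += 1
--             time_cost = page
--         else:
--             time_cost += page
--     return count
-- ===== SOURCE B (Python) =====
-- def get_least_ppl(pages, limit_time):
--     # prefix sums: pre[i] = sum of first i pages
--     pre = [0]
--     for p in pages:
--         pre.append(pre[-1] + p)
--     # max segment tree over pre: leaf = (value,), node = (max, left, right)
--     def build(lo, hi):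
--         if hi - lo == 1:
--             return (pre[lo],)
--         mid = lo + (hi - lo) // 2
--         l = build(lo, mid)
--         r = build(mid, hi)
--         return (max(l[0], r[0]), l, r)
--     root = build(0, len(pre))
--     def first_gt(node, a, size, lo, x):
--         # first index m in [a, a+size) with m >= lo and pre[m] > x
--         if node[0] <= x or a + size <= lo:
--             return None
--         if len(node) == 1:
--             return a if lo <= a else None
--         half = size // 2
--         res = first_gt(node[1], a, half, lo, x)
--         if res is not None:
--             return res
--         return first_gt(node[2], a + half, size - half, lo, x)
--     # each worker's chunk ends just before the first prefix exceeding base+limit: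
--     # jump from boundary to boundary via segment-tree descent
--     count = 1
--     lo, x = 1, limit_time
--     while True:
--         m = first_gt(root, 0, len(pre), lo, x)
--         if m is None:
--             return count
--         count += 1
--         lo, x = m + 1, pre[m - 1] + limit_time
-- ===== Notes on version B (the rewrite author's own statement) =====
-- stated objective: alternative
-- what changed: Replaces A's single running-accumulator scan by a table-driven method: build the prefix-sum array and a max segment tree over it, then count chunks by jumping from boundary to boundary, each jump a segment-tree descent finding the first prefix sum exceeding base+limit.
import Mathlib
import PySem

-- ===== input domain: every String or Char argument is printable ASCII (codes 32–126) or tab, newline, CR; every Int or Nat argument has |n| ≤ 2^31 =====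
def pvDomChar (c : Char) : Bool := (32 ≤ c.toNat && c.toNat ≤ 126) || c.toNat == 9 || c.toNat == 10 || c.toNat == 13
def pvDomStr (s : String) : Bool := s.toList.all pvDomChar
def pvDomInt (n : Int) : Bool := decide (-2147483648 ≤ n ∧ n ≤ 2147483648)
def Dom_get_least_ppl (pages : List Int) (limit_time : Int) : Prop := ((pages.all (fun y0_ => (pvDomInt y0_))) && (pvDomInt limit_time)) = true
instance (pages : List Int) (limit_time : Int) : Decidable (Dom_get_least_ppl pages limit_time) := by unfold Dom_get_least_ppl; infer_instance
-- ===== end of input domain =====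

-- B replaces A's running-accumulator scan by a table-driven jump: it builds the prefix-sum
-- array and a max segment tree over it, then hops from chunk boundary to chunk boundary by
-- segment-tree descent ("first prefix exceeding base+limit"); objective: alternative.

-- ===== PORT A =====
def get_least_ppl (pages : List Int) (limit_time : Int) : Int :=
  (pages.foldl
    (fun (st : Int × Int) page =>
      if st.2 + page > limit_time then (st.1 + 1, page) else (st.1, st.2 + page))
    (1, 0)).1

-- ===== PORT B =====
-- prefix-sum list: pre = [0, p0, p0+p1, …] (the appending loop, as structural recursion)
def pvPref (s : Int) : List Int → List Int
  | [] => [s]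
  | p :: t => s :: pvPref (s + p) t

-- max segment tree over the prefix list: leaf = value, node = (max, left, right)
inductive PvSeg : Type where
  | leaf : Int → PvSeg
  | node : Int → PvSeg → PvSeg → PvSeg
deriving Repr, DecidableEq

def pvMval : PvSeg → Int
  | .leaf v => v
  | .node mx _ _ => mx

-- build over a contiguous slice of the prefix list (python builds pre[lo:hi] by index pair;
-- here the slice itself is passed, split at its midpoint exactly as mid = lo + (hi-lo)//2)
def pvBuild : List Int → PvSeg
  | [] => .leaf 0          -- unreachable: pre is never empty
  | [v] => .leaf v
  | a :: b :: t =>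
    let xs := a :: b :: t
    let k := xs.length / 2
    let l := pvBuild (xs.take k)
    let r := pvBuild (xs.drop k)
    .node (max (pvMval l) (pvMval r)) l r
termination_by xs => xs.length
decreasing_by
  · simp; omega
  · simp; omega

-- first index m in [a, a+size) with m ≥ lo and value > x, by max-pruned descent
def pvFirstGt : PvSeg → Nat → Nat → Nat → Int → Option Nat
  | .leaf v, a, sz, lo, x =>
    if v ≤ x ∨ a + sz ≤ lo then none
    else if lo ≤ a then some a else none
  | .node mx l r, a, sz, lo, x =>
    if mx ≤ x ∨ a + sz ≤ lo then none
    else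
      match pvFirstGt l a (sz / 2) lo x with
      | some m => some m
      | none => pvFirstGt r (a + sz / 2) (sz - sz / 2) lo x

-- the chunk-jumping while loop (fuel = one unit per possible boundary, only to make the
-- same computation total; the proof shows P.length suffices)
def pvJump (t : PvSeg) (P : List Int) (limit : Int) : Nat → Nat → Int → Int → Int
  | 0, _, _, count => count
  | fuel + 1, lo, x, count =>
    match pvFirstGt t 0 P.length lo x with
    | none => count
    | some m => pvJump t P limit fuel (m + 1) (P.getD (m - 1) 0 + limit) (count + 1)

def get_least_ppl_alt (pages : List Int) (limit_time : Int) : Int :=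
  let P := pvPref 0 pages
  let t := pvBuild P
  pvJump t P limit_time P.length 1 limit_time 1

-- ===== PRECONDITION & SPEC =====
def Spec_get_least_ppl (pages : List Int) (limit_time : Int) (out : Int) : Prop := out = get_least_ppl_alt pages limit_time
instance (pages : List Int) (limit_time : Int) (out : Int) : Decidable (Spec_get_least_ppl pages limit_time out) := by unfold Spec_get_least_ppl; infer_instance

-- ===== CLAIM (what is proved, stated in full; the proofs are below) =====
def Claim_equal_get_least_ppl : Prop := ∀ (pages : List Int) (limit_time : Int), Dom_get_least_ppl pages limit_time → Spec_get_least_ppl pages limit_time (get_least_ppl pages limit_time)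

-- ===== LEMMAS AND PROOFS =====

-- number of resets A performs starting from accumulated time s
def pvExtra (limit_time : Int) : List Int → Int → Int
  | [], _ => 0
  | p :: t, s => if s + p > limit_time then 1 + pvExtra limit_time t p else pvExtra limit_time t (s + p)

theorem foldl_fst_eq_extra (limit_time : Int) :
    ∀ (xs : List Int) (c s : Int),
      (xs.foldl
        (fun (st : Int × Int) page =>
          if st.2 + page > limit_time then (st.1 + 1, page) else (st.1, st.2 + page))
        (c, s)).1 = c + pvExtra limit_time xs s := by
  intro xs
  induction xs with
  | nil => intro c s; simp [pvExtra]
  | cons p t ih =>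
    intro c s
    simp only [List.foldl, pvExtra]
    by_cases h : s + p > limit_time
    · simp only [if_pos h, ih]; ring
    · simp only [if_neg h, ih]

-- linear specification of pvFirstGt on the flattened list
def pvFirstGtL (x : Int) (lo : Nat) : List Int → Nat → Option Nat
  | [], _ => none
  | v :: t, a => if lo ≤ a ∧ x < v then some a else pvFirstGtL x lo t (a + 1)

theorem firstGtL_none_of_ge (x : Int) (lo : Nat) :
    ∀ (xs : List Int) (a : Nat), a + xs.length ≤ lo → pvFirstGtL x lo xs a = none := by
  intro xs
  induction xs with
  | nil => intro a _; simp [pvFirstGtL]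
  | cons v t ih =>
    intro a h
    simp only [List.length_cons] at h
    have h1 : ¬ (lo ≤ a ∧ x < v) := by omega
    simp only [pvFirstGtL, if_neg h1]
    exact ih (a + 1) (by omega)

theorem firstGtL_none_of_le (x : Int) (lo : Nat) :
    ∀ (xs : List Int) (a : Nat), (∀ v ∈ xs, v ≤ x) → pvFirstGtL x lo xs a = none := by
  intro xs
  induction xs with
  | nil => intro a _; simp [pvFirstGtL]
  | cons v t ih =>
    intro a h
    have hv : v ≤ x := h v (by simp)
    have h1 : ¬ (lo ≤ a ∧ x < v) := by
      rintro ⟨_, hx⟩; omega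
    simp only [pvFirstGtL, if_neg h1]
    exact ih (a + 1) (fun w hw => h w (by simp [hw]))

theorem firstGtL_append (x : Int) (lo : Nat) :
    ∀ (l r : List Int) (a : Nat),
      pvFirstGtL x lo (l ++ r) a =
        match pvFirstGtL x lo l a with
        | some m => some m
        | none => pvFirstGtL x lo r (a + l.length) := by
  intro l
  induction l with
  | nil => intro r a; simp [pvFirstGtL]
  | cons v t ih =>
    intro r a
    simp only [List.cons_append, pvFirstGtL]
    by_cases h : lo ≤ a ∧ x < v
    · simp [if_pos h]
    · simp only [if_neg h, ih, List.length_cons]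
      have : a + 1 + t.length = a + (t.length + 1) := by omega
      rw [this]

-- skipping an index whose value does not exceed x
theorem firstGtL_low_congr (x : Int) :
    ∀ (xs : List Int) (a lo lo' : Nat), lo ≤ a → lo' ≤ a →
      pvFirstGtL x lo xs a = pvFirstGtL x lo' xs a := by
  intro xs
  induction xs with
  | nil => intro a lo lo' _ _; simp [pvFirstGtL]
  | cons v t ih =>
    intro a lo lo' h1 h2
    simp only [pvFirstGtL]
    by_cases hx : x < v
    · simp [h1, h2, hx]
    · simp only [hx, and_false, if_false]
      exact ih (a + 1) lo lo' (by omega) (by omega)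

theorem firstGtL_skip (x : Int) :
    ∀ (xs : List Int) (a lo : Nat), a ≤ lo → lo - a < xs.length → xs.getD (lo - a) 0 ≤ x →
      pvFirstGtL x lo xs a = pvFirstGtL x (lo + 1) xs a := by
  intro xs
  induction xs with
  | nil => intro a lo _ h _; simp at h
  | cons v t ih =>
    intro a lo hle hlt hx
    by_cases h : a = lo
    · subst h
      simp only [Nat.sub_self, List.getD_cons_zero] at hx
      have h1 : ¬ (a ≤ a ∧ x < v) := by rintro ⟨_, h2⟩; omega
      have h2 : ¬ (a + 1 ≤ a ∧ x < v) := by omega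
      simp only [pvFirstGtL, if_neg h1, if_neg h2]
      exact firstGtL_low_congr x t (a + 1) a (a + 1) (by omega) (by omega)
    · have ha : a < lo := by omega
      have h1 : ¬ (lo ≤ a ∧ x < v) := by omega
      have h2 : ¬ (lo + 1 ≤ a ∧ x < v) := by omega
      simp only [pvFirstGtL, if_neg h1, if_neg h2]
      have hd : t.getD (lo - (a + 1)) 0 = (v :: t).getD (lo - a) 0 := by
        have : lo - a = (lo - (a + 1)) + 1 := by omega
        rw [this, List.getD_cons_succ]
      refine ih (a + 1) lo (by omega) ?_ ?_
      · simp only [List.length_cons] at hlt; omega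
      · rw [hd]; exact hx

theorem firstGtL_hit (x : Int) :
    ∀ (xs : List Int) (a lo : Nat), a ≤ lo → lo - a < xs.length → x < xs.getD (lo - a) 0 →
      pvFirstGtL x lo xs a = some lo := by
  intro xs
  induction xs with
  | nil => intro a lo _ h _; simp at h
  | cons v t ih =>
    intro a lo hle hlt hx
    by_cases h : a = lo
    · subst h
      simp only [Nat.sub_self, List.getD_cons_zero] at hx
      simp [pvFirstGtL, hx]
    · have ha : a < lo := by omega
      have h1 : ¬ (lo ≤ a ∧ x < v) := by omega
      simp only [pvFirstGtL, if_neg h1]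
      have hd : t.getD (lo - (a + 1)) 0 = (v :: t).getD (lo - a) 0 := by
        have : lo - a = (lo - (a + 1)) + 1 := by omega
        rw [this, List.getD_cons_succ]
      refine ih (a + 1) lo (by omega) ?_ ?_
      · simp only [List.length_cons] at hlt; omega
      · rw [hd]; exact hx

-- well-formedness of a segment tree for a slice
def pvGood : PvSeg → List Int → Prop
  | .leaf v, xs => xs = [v]
  | .node mx l r, xs =>
      2 ≤ xs.length ∧ (∀ v ∈ xs, v ≤ mx) ∧
      pvGood l (xs.take (xs.length / 2)) ∧ pvGood r (xs.drop (xs.length / 2))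

theorem good_le_mval : ∀ (t : PvSeg) (xs : List Int), pvGood t xs → ∀ v ∈ xs, v ≤ pvMval t := by
  intro t
  cases t with
  | leaf w =>
    intro xs h v hv
    simp only [pvGood] at h
    subst h
    simp only [List.mem_singleton] at hv
    simp [hv, pvMval]
  | node mx l r =>
    intro xs h v hv
    exact h.2.1 v hv

theorem build_good_aux : ∀ (n : Nat) (xs : List Int), xs.length ≤ n → xs ≠ [] → pvGood (pvBuild xs) xs := by
  intro n
  induction n with
  | zero =>
    intro xs hl hne
    cases xs with
    | nil => exact absurd rfl hne
    | cons a t => simp at hl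
  | succ n ih =>
    intro xs hl hne
    match xs with
    | [] => exact absurd rfl hne
    | [v] => simp [pvBuild, pvGood]
    | a :: b :: t =>
    have hlen : 2 ≤ (a :: b :: t).length := by simp
    have hk1 : (a :: b :: t).length / 2 ≥ 1 := by simp; omega
    have hk2 : (a :: b :: t).length / 2 < (a :: b :: t).length := by
      simp only [List.length_cons]; omega
    have htake : (a :: b :: t).take ((a :: b :: t).length / 2) ≠ [] := by
      intro h
      have := congrArg List.length h
      simp only [List.length_take, List.length_nil] at this
      omega
    have hdrop : (a :: b :: t).drop ((a :: b :: t).length / 2) ≠ [] := by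
      intro h
      have := congrArg List.length h
      simp only [List.length_drop, List.length_nil] at this
      omega
    have g1 := ih _ (by simp only [List.length_take]; simp at hl ⊢; omega) htake
    have g2 := ih _ (by simp only [List.length_drop]; simp at hl ⊢; omega) hdrop
    show pvGood (pvBuild (a :: b :: t)) (a :: b :: t)
    rw [pvBuild]
    refine ⟨hlen, ?_, g1, g2⟩
    intro v hv
    have := (List.take_append_drop ((a :: b :: t).length / 2) (a :: b :: t)).symm
    rw [this] at hv
    rcases List.mem_append.mp hv with h | h
    · exact le_trans (good_le_mval _ _ g1 v h) (le_max_left _ _)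
    · exact le_trans (good_le_mval _ _ g2 v h) (le_max_right _ _)

theorem build_good (xs : List Int) (hne : xs ≠ []) : pvGood (pvBuild xs) xs :=
  build_good_aux xs.length xs (le_refl _) hne

theorem firstGt_correct :
    ∀ (t : PvSeg) (xs : List Int) (a lo : Nat) (x : Int), pvGood t xs →
      pvFirstGt t a xs.length lo x = pvFirstGtL x lo xs a := by
  intro t
  induction t with
  | leaf v =>
    intro xs a lo x h
    simp only [pvGood] at h
    subst h
    simp only [pvFirstGt, List.length_singleton, pvFirstGtL]
    by_cases h1 : v ≤ x ∨ a + 1 ≤ lo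
    · rw [if_pos h1]
      have : ¬ (lo ≤ a ∧ x < v) := by
        rintro ⟨hla, hxv⟩
        rcases h1 with h | h
        · omega
        · omega
      rw [if_neg this]
    · rw [if_neg h1]
      have hx : x < v := by omega
      have hlo : lo ≤ a := by omega
      rw [if_pos hlo, if_pos (⟨hlo, hx⟩ : lo ≤ a ∧ x < v)]
  | node mx l r ihl ihr =>
    intro xs a lo x h
    obtain ⟨hlen, hmax, gl, gr⟩ := h
    have hkt : (xs.take (xs.length / 2)).length = xs.length / 2 := by
      rw [List.length_take]; omega
    have hkd : (xs.drop (xs.length / 2)).length = xs.length - xs.length / 2 := by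
      rw [List.length_drop]
    simp only [pvFirstGt]
    by_cases h1 : mx ≤ x ∨ a + xs.length ≤ lo
    · rw [if_pos h1]
      rcases h1 with h1 | h1
      · exact (firstGtL_none_of_le x lo xs a (fun v hv => le_trans (hmax v hv) h1)).symm
      · exact (firstGtL_none_of_ge x lo xs a h1).symm
    · rw [if_neg h1]
      conv_rhs => rw [← List.take_append_drop (xs.length / 2) xs]
      rw [firstGtL_append]
      have el := ihl (xs.take (xs.length / 2)) a lo x gl
      have er := ihr (xs.drop (xs.length / 2)) (a + xs.length / 2) lo x gr
      rw [hkt] at el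
      rw [hkd] at er
      rw [el, er, hkt]

theorem pref_length : ∀ (xs : List Int) (s : Int), (pvPref s xs).length = xs.length + 1 := by
  intro xs
  induction xs with
  | nil => intro s; simp [pvPref]
  | cons p t ih => intro s; simp [pvPref, ih]

theorem pref_ne_nil (xs : List Int) (s : Int) : pvPref s xs ≠ [] := by
  cases xs <;> simp [pvPref]

theorem pref_getD_zero : ∀ (xs : List Int) (s : Int), (pvPref s xs).getD 0 0 = s := by
  intro xs s
  cases xs <;> simp [pvPref]

theorem pref_succ : ∀ (xs : List Int) (s : Int) (k : Nat), k < xs.length →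
    (pvPref s xs).getD (k + 1) 0 = (pvPref s xs).getD k 0 + xs.getD k 0 := by
  intro xs
  induction xs with
  | nil => intro s k h; simp at h
  | cons p t ih =>
    intro s k h
    cases k with
    | zero =>
      simp only [pvPref, List.getD_cons_succ, List.getD_cons_zero]
      rw [pref_getD_zero]
    | succ j =>
      simp only [pvPref, List.getD_cons_succ]
      exact ih (s + p) j (by simp at h; omega)

-- the bridge: A's reset count from position k (base b) equals B's jump loop from lo = k+1
theorem bridge (pages : List Int) (limit : Int) (t : PvSeg)
    (hg : pvGood t (pvPref 0 pages)) :
    ∀ (d fuel k b : Nat) (count : Int), pages.length - k = d → k ≤ pages.length → b ≤ k → d ≤ fuel →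
      pvJump t (pvPref 0 pages) limit fuel (k + 1)
        ((pvPref 0 pages).getD b 0 + limit) count =
      count + pvExtra limit (pages.drop k)
        ((pvPref 0 pages).getD k 0 - (pvPref 0 pages).getD b 0) := by
  set P := pvPref 0 pages with hP
  have hPlen : P.length = pages.length + 1 := pref_length pages 0
  intro d
  induction d with
  | zero =>
    intro fuel k b count hd hk _ _
    have hkn : k = pages.length := by omega
    have hdrop : pages.drop k = [] := by
      rw [hkn]; exact List.drop_length
    rw [hdrop]
    simp only [pvExtra, add_zero]
    cases fuel with
    | zero => simp [pvJump]
    | succ f =>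
      simp only [pvJump]
      rw [firstGt_correct t P 0 (k + 1) _ hg,
        firstGtL_none_of_ge _ _ P 0 (by omega)]
  | succ d ih =>
    intro fuel k b count hd hk hb hfuel
    have hklt : k < pages.length := by omega
    obtain ⟨f, rfl⟩ : ∃ f, fuel = f + 1 := ⟨fuel - 1, by omega⟩
    have hdrop : pages.drop k = pages.getD k 0 :: pages.drop (k + 1) := by
      rw [List.getD_eq_getElem pages 0 hklt]
      exact List.drop_eq_getElem_cons hklt
    have hsucc : P.getD (k + 1) 0 = P.getD k 0 + pages.getD k 0 := pref_succ pages 0 k hklt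
    rw [hdrop]
    simp only [pvExtra]
    by_cases hc : P.getD k 0 - P.getD b 0 + pages.getD k 0 > limit
    · rw [if_pos hc]
      have hx : P.getD b 0 + limit < P.getD (k + 1) 0 := by omega
      simp only [pvJump]
      rw [firstGt_correct t P 0 (k + 1) _ hg,
        firstGtL_hit _ P 0 (k + 1) (by omega) (by omega) (by simpa using hx)]
      have hred : (match some (k + 1) with
          | none => count
          | some m => pvJump t P limit f (m + 1) (P.getD (m - 1) 0 + limit) (count + 1)) =
          pvJump t P limit f (k + 2) (P.getD k 0 + limit) (count + 1) := rfl
      rw [hred]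
      rw [ih f (k + 1) k (count + 1) (by omega) (by omega) (by omega) (by omega)]
      have hpage : P.getD (k + 1) 0 - P.getD k 0 = pages.getD k 0 := by omega
      rw [hpage]
      ring
    · rw [if_neg hc]
      have hx : P.getD (k + 1) 0 ≤ P.getD b 0 + limit := by omega
      have hskip : pvFirstGtL (P.getD b 0 + limit) (k + 1) P 0 =
          pvFirstGtL (P.getD b 0 + limit) (k + 2) P 0 :=
        firstGtL_skip _ P 0 (k + 1) (by omega) (by omega) (by simpa using hx)
      have hunf : pvJump t P limit (f + 1) (k + 1) (P.getD b 0 + limit) count =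
          pvJump t P limit (f + 1) (k + 2) (P.getD b 0 + limit) count := by
        simp only [pvJump]
        rw [firstGt_correct t P 0 (k + 1) _ hg, firstGt_correct t P 0 (k + 2) _ hg, hskip]
      rw [hunf]
      have := ih (f + 1) (k + 1) b count (by omega) (by omega) (by omega) (by omega)
      rw [show k + 1 + 1 = k + 2 by omega] at this
      rw [this, hsucc]
      ring_nf

-- ===== VERDICT (by name: the statement is the Claim_ definition above) =====
theorem get_least_ppl_spec : Claim_equal_get_least_ppl := by
  intro pages limit _
  unfold Spec_get_least_ppl get_least_ppl get_least_ppl_alt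
  rw [foldl_fst_eq_extra]
  have hg := build_good (pvPref 0 pages) (pref_ne_nil pages 0)
  have h := bridge pages limit (pvBuild (pvPref 0 pages)) hg
    pages.length (pvPref 0 pages).length 0 0 1 rfl (by omega) (by omega)
    (by rw [pref_length]; omega)
  rw [pref_getD_zero] at h
  simp only [zero_add, List.drop_zero, sub_self] at h
  rw [h]
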